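-- pv_equiv track=rewrite | github.com/Chriszzx/ProjectSTS | scripts/combination.py | process_mark
-- ===== SOURCE A (Python) =====
-- from typing import List, Set
--
-- def process_mark(lines: List[str]) -> List[str]:
--     result_lines = []
--
--     i = 0
--     while i < len(lines):
--         current_line = lines[i]
--         count = 1
--
--         j = i + 1
--         while j < len(lines) and lines[j] == current_line:
--             count += 1
--             j += 1
--
--         if count > 1:
--             for k in range(count):
--                 marked_line = "#####" + current_line
--                 result_lines.append(marked_line)
--         else:
--             result_lines.append(current_line)
--
--         i = j
--
--     return result_lines
-- ===== SOURCE B (Python) =====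
-- def process_mark(lines):
--     out = []
--     prev = None
--     for i, cur in enumerate(lines):
--         nxt = lines[i + 1] if i + 1 < len(lines) else None
--         if cur == prev or cur == nxt:
--             out.append("#####" + cur)
--         else:
--             out.append(cur)
--         prev = cur
--     return out
-- ===== Notes on version B (the rewrite author's own statement) =====
-- stated objective: simpler
-- what changed: Replaced the run-counting nested while-loop plus count-based emit loop with a single pass that marks each line iff it equals its previous or next neighbor.
import Mathlib
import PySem

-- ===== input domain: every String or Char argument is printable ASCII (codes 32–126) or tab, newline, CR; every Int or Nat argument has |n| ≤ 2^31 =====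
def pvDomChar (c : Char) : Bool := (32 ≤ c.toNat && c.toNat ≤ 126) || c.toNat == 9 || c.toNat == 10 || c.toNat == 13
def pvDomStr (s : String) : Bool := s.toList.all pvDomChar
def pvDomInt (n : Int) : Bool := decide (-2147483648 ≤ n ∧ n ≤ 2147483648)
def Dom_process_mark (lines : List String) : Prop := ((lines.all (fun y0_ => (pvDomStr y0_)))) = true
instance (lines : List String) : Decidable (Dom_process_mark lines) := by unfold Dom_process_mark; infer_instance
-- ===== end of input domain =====

-- B replaces A's run-counting nested loop with a single pass marking each line
-- iff it equals its previous or next neighbor (objective: simpler).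

-- ===== PORT A =====
-- inner while loop: count further equal lines (count = 1 + runCount)
def runCount (x : String) : List String → Nat
  | [] => 0
  | y :: ys => if y == x then runCount x ys + 1 else 0

-- advancing i to j: drop the rest of the run
def dropRun (x : String) : List String → List String
  | [] => []
  | y :: ys => if y == x then dropRun x ys else y :: ys

theorem dropRun_length_le (x : String) (l : List String) : (dropRun x l).length ≤ l.length := by
  induction l with
  | nil => simp [dropRun]
  | cons y ys ih =>
    simp only [dropRun]
    split
    · exact Nat.le_trans ih (Nat.le_succ _)
    · simp

def process_mark (lines : List String) : List String :=
  match lines with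
  | [] => []
  | x :: rest =>
    let count := 1 + runCount x rest
    (if count > 1 then List.replicate count ("#####" ++ x) else [x])
      ++ process_mark (dropRun x rest)
termination_by lines.length
decreasing_by
  simpa using Nat.lt_succ_of_le (dropRun_length_le x rest)

-- ===== PORT B =====
-- one pass: prev carries the previous line (none at the start), rest.head? is the next line
def markPass (prev : Option String) : List String → List String
  | [] => []
  | x :: rest =>
    (if prev == some x || rest.head? == some x then "#####" ++ x else x)
      :: markPass (some x) rest

def process_mark_alt (lines : List String) : List String := markPass none lines

-- ===== PRECONDITION & SPEC =====
def Spec_process_mark (lines : List String) (out : List String) : Prop := out = process_mark_alt lines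
instance (lines : List String) (out : List String) : Decidable (Spec_process_mark lines out) := by unfold Spec_process_mark; infer_instance

-- ===== CLAIM (what is proved, stated in full; the proofs are below) =====
def Claim_equal_process_mark : Prop := ∀ (lines : List String), Dom_process_mark lines → Spec_process_mark lines (process_mark lines)

-- ===== LEMMAS AND PROOFS =====

theorem runDecomp (x : String) (l : List String) :
    l = List.replicate (runCount x l) x ++ dropRun x l := by
  induction l with
  | nil => simp [runCount, dropRun]
  | cons y ys ih =>
    simp only [runCount, dropRun]
    by_cases h : y = x
    · subst h; simp only [beq_self_eq_true, if_true, List.replicate_succ]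
      simpa using ih
    · simp [beq_eq_false_iff_ne.mpr h]

theorem dropRun_head (x : String) (l : List String) :
    (dropRun x l).head? ≠ some x := by
  induction l with
  | nil => simp [dropRun]
  | cons y ys ih =>
    by_cases h : y = x
    · simpa [dropRun, h] using ih
    · simp [dropRun, h]

theorem markPass_run (x : String) (k : Nat) (rest : List String)
    (_h : rest.head? ≠ some x) :
    markPass (some x) (List.replicate k x ++ rest)
      = List.replicate k ("#####" ++ x) ++ markPass (some x) rest := by
  induction k with
  | zero => simp
  | succ n ih =>
    simp only [List.replicate_succ, List.cons_append, markPass]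
    simp only [beq_self_eq_true, Bool.true_or, if_true, List.cons.injEq, true_and]
    exact ih

theorem main_lemma (lines : List String) (prev : Option String)
    (h : ∀ x, lines.head? = some x → prev ≠ some x) :
    process_mark lines = markPass prev lines := by
  match lines with
  | [] => simp [process_mark, markPass]
  | x :: rest =>
    have hprev : prev ≠ some x := h x rfl
    have hdecomp := runDecomp x rest
    have hhead := dropRun_head x rest
    rw [process_mark]
    have hrec : process_mark (dropRun x rest) = markPass (some x) (dropRun x rest) :=
      main_lemma (dropRun x rest) (some x) (by
        intro y hy he
        exact hhead (hy.trans he.symm))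
    by_cases hk : runCount x rest = 0
    · -- count = 1: no run
      have e : rest = dropRun x rest := by simpa [hk] using hdecomp
      have hrest : rest.head? ≠ some x := by rw [e]; exact hhead
      simp only [hk, Nat.add_zero, show ¬ (1 > 1) by omega, if_false]
      simp only [markPass, beq_eq_false_iff_ne.mpr hprev,
        beq_eq_false_iff_ne.mpr hrest, Bool.or_self, Bool.false_eq_true, if_false]
      rw [hrec, ← e]
      simp
    · -- count > 1
      obtain ⟨m, hm⟩ : ∃ m, runCount x rest = m + 1 :=
        ⟨runCount x rest - 1, (Nat.succ_pred_eq_of_pos (Nat.pos_of_ne_zero hk)).symm⟩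
      have hne : rest.head? = some x := by
        rw [hdecomp, hm]; simp [List.replicate_succ]
      rw [if_pos (by omega : 1 + runCount x rest > 1), hrec]
      simp only [markPass, hne, beq_self_eq_true, Bool.or_true, if_true]
      conv_rhs => rw [hdecomp, markPass_run x _ _ hhead]
      rw [Nat.add_comm, List.replicate_succ]
      simp
  termination_by lines.length
  decreasing_by
    simpa using Nat.lt_succ_of_le (dropRun_length_le x rest)

-- ===== VERDICT (by name: the statement is the Claim_ definition above) =====
theorem process_mark_spec : Claim_equal_process_mark := by
  intro lines _
  unfold Spec_process_mark process_mark_alt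
  exact main_lemma lines none (by intro x _ h; cases h)
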